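-- pv_equiv track=rewrite | github.com/DevarajAutomation/Python_Basic_Programming | Hackerrank/electronic-shp.py | purchase_electronic
-- ===== SOURCE A (Python) =====
-- def purchase_electronic(keyboards,drives,budget):
--
--     money_spent=-1
--
--     for keyboard in keyboards:
--         for drive in drives:
--             total_cost= keyboard + drive
--
--             if total_cost <=budget and total_cost > money_spent:
--                 money_spent=total_cost
--     return money_spent
-- ===== SOURCE B (Python) =====
-- def purchase_electronic(keyboards, drives, budget):
--     ds = sorted(drives)
--     n = len(ds)
--     best = -1
--     for k in keyboards:
--         limit = budget - k
--         lo, hi = 0, n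
--         while lo < hi:
--             mid = (lo + hi) // 2
--             if ds[mid] <= limit:
--                 lo = mid + 1
--             else:
--                 hi = mid
--         if lo > 0:
--             c = k + ds[lo - 1]
--             if c > best:
--                 best = c
--     return best
-- ===== Notes on version B (the rewrite author's own statement) =====
-- stated objective: faster
-- what changed: Replaces the nested scan over all keyboard/drive pairs by sorting the drives once and, for each keyboard, a hand-written binary search for the largest drive that still fits the budget.
import Mathlib
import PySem

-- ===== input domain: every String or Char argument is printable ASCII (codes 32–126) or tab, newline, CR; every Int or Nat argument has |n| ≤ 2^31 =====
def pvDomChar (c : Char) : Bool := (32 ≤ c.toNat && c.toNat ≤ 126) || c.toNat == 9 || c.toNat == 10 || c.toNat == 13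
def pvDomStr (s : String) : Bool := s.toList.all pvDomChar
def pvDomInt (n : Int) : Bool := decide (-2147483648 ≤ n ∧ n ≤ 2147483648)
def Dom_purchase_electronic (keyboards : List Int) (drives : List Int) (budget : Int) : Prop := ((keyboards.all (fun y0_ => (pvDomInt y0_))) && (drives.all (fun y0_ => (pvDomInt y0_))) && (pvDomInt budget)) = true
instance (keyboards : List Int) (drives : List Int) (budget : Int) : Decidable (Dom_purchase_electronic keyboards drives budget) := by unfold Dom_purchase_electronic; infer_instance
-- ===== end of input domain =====

-- B sorts the drives once and binary-searches, per keyboard, the largest drive that fits the budget (faster: O((n+m) log m) vs A's O(n*m)).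


-- ===== PORT A =====
def purchase_electronic (keyboards : List Int) (drives : List Int) (budget : Int) : Int :=
  keyboards.foldl (fun money_spent keyboard =>
    drives.foldl (fun money_spent drive =>
      let total_cost := keyboard + drive
      if total_cost ≤ budget ∧ total_cost > money_spent then total_cost else money_spent)
      money_spent)
    (-1)

-- ===== PORT B =====
-- the while lo < hi loop of Source B, step for step; the fuel argument (hi - lo, which
-- strictly shrinks each iteration) only makes the recursion structural, it never runs out
def pvBrGo (ds : List Int) (limit : Int) : Nat → Nat → Nat → Nat
  | 0, lo, _hi => lo
  | fuel + 1, lo, hi =>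
    if lo < hi then
      let mid := (lo + hi) / 2
      if ds.getD mid 0 ≤ limit then pvBrGo ds limit fuel (mid + 1) hi
      else pvBrGo ds limit fuel lo mid
    else lo

def pvBrLoop (ds : List Int) (limit : Int) (lo hi : Nat) : Nat :=
  pvBrGo ds limit (hi - lo) lo hi

def purchase_electronic_alt (keyboards : List Int) (drives : List Int) (budget : Int) : Int :=
  let ds := PySem.List.sorted drives (fun x => x)
  keyboards.foldl (fun best k =>
    let limit := budget - k
    let lo := pvBrLoop ds limit 0 ds.length
    if lo > 0 then
      let c := k + ds.getD (lo - 1) 0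
      if c > best then c else best
    else best)
    (-1)

-- ===== PRECONDITION & SPEC =====
def Spec_purchase_electronic (keyboards : List Int) (drives : List Int) (budget : Int) (out : Int) : Prop := out = purchase_electronic_alt keyboards drives budget
instance (keyboards : List Int) (drives : List Int) (budget : Int) (out : Int) : Decidable (Spec_purchase_electronic keyboards drives budget out) := by unfold Spec_purchase_electronic; infer_instance

-- ===== CLAIM (what is proved, stated in full; the proofs are below) =====
def Claim_equal_purchase_electronic : Prop := ∀ (keyboards : List Int) (drives : List Int) (budget : Int), Dom_purchase_electronic keyboards drives budget → Spec_purchase_electronic keyboards drives budget (purchase_electronic keyboards drives budget)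

-- ===== LEMMAS AND PROOFS =====

-- A's inner update equals a max-update restricted to affordable totals
theorem pvInnerA_eq_g (k budget : Int) (drives : List Int) (m : Int) :
    drives.foldl (fun money_spent drive =>
      let total_cost := k + drive
      if total_cost ≤ budget ∧ total_cost > money_spent then total_cost else money_spent) m
    = drives.foldl (fun m d => if d ≤ budget - k then max m (k + d) else m) m := by
  have h : (fun (money_spent drive : Int) =>
      let total_cost := k + drive
      if total_cost ≤ budget ∧ total_cost > money_spent then total_cost else money_spent)
      = (fun (m d : Int) => if d ≤ budget - k then max m (k + d) else m) := by
    funext m d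
    simp only [max_def]
    split_ifs <;> omega
  rw [h]

-- the g-fold is permutation invariant
theorem pvG_perm (k budget : Int) {l₁ l₂ : List Int} (h : l₁.Perm l₂) (m : Int) :
    l₁.foldl (fun m d => if d ≤ budget - k then max m (k + d) else m) m
    = l₂.foldl (fun m d => if d ≤ budget - k then max m (k + d) else m) m := by
  have rc : RightCommutative (fun (m d : Int) => if d ≤ budget - k then max m (k + d) else m) := by
    constructor
    intro b a1 a2
    simp only [max_def]
    split_ifs <;> omega
  exact @List.Perm.foldl_eq _ _ _ _ _ rc h m

-- if nothing fits, the g-fold is the identity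
theorem pvG_none (k budget : Int) (l : List Int) (m : Int)
    (h : ∀ d ∈ l, ¬ d ≤ budget - k) :
    l.foldl (fun m d => if d ≤ budget - k then max m (k + d) else m) m = m := by
  induction l generalizing m with
  | nil => rfl
  | cons d tl ih =>
    simp only [List.foldl_cons]
    rw [if_neg (h d (List.mem_cons_self))]
    exact ih m (fun d hd => h d (List.mem_cons_of_mem _ hd))

-- if every fitting element's total is already below m, the g-fold is the identity
theorem pvG_below (k budget : Int) (l : List Int) (m : Int)
    (h : ∀ d ∈ l, d ≤ budget - k → k + d ≤ m) :
    l.foldl (fun m d => if d ≤ budget - k then max m (k + d) else m) m = m := by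
  induction l generalizing m with
  | nil => rfl
  | cons d tl ih =>
    simp only [List.foldl_cons]
    have hstep : (if d ≤ budget - k then max m (k + d) else m) = m := by
      by_cases hd : d ≤ budget - k
      · rw [if_pos hd]
        have := h d (List.mem_cons_self) hd
        simp only [max_def]
        split_ifs <;> omega
      · rw [if_neg hd]
    rw [hstep]
    exact ih m (fun d hd => h d (List.mem_cons_of_mem _ hd))

-- if M is a fitting element dominating every fitting element, the g-fold is max m (k+M)
theorem pvG_max (k budget : Int) (l : List Int) (M m : Int)
    (hM : M ∈ l) (hMle : M ≤ budget - k) (hdom : ∀ d ∈ l, d ≤ budget - k → d ≤ M) :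
    l.foldl (fun m d => if d ≤ budget - k then max m (k + d) else m) m = max m (k + M) := by
  induction l generalizing m with
  | nil => exact absurd hM (List.not_mem_nil)
  | cons d tl ih =>
    simp only [List.foldl_cons]
    by_cases htl : M ∈ tl
    · rw [ih _ htl (fun x hx hxle => hdom x (List.mem_cons_of_mem _ hx) hxle)]
      have hd' : d ≤ budget - k → d ≤ M := hdom d (List.mem_cons_self)
      by_cases hd : d ≤ budget - k
      · rw [if_pos hd]
        have := hd' hd
        simp only [max_def]; split_ifs <;> omega
      · rw [if_neg hd]
    · have hdM : d = M := by
        rcases List.mem_cons.mp hM with h1 | h2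
        · exact h1.symm
        · exact absurd h2 htl
      subst hdM
      rw [if_pos hMle]
      exact pvG_below k budget tl (max m (k + d))
        (fun x hx hxle => by
          have := hdom x (List.mem_cons_of_mem _ hx) hxle
          simp only [max_def]; split_ifs <;> omega)


-- getD is monotone on a (≤)-sorted list
theorem pvGetD_mono (ds : List Int) (hs : ds.Pairwise (· ≤ ·)) {i j : Nat}
    (hij : i ≤ j) (hj : j < ds.length) : ds.getD i 0 ≤ ds.getD j 0 := by
  have hi : i < ds.length := Nat.lt_of_le_of_lt hij hj
  rw [List.getD_eq_getElem _ _ hi, List.getD_eq_getElem _ _ hj]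
  rcases Nat.lt_or_ge i j with hlt | hge
  · exact List.pairwise_iff_getElem.mp hs i j hi hj hlt
  · have hij' : i = j := Nat.le_antisymm hij hge
    subst hij'; exact le_refl _

theorem pvBrLoop_aux (ds : List Int) (limit : Int) (hs : ds.Pairwise (· ≤ ·)) :
    ∀ n lo hi, hi - lo ≤ n → lo ≤ hi → hi ≤ ds.length →
    (∀ j < lo, ds.getD j 0 ≤ limit) →
    (∀ j, hi ≤ j → j < ds.length → limit < ds.getD j 0) →
    lo ≤ pvBrGo ds limit n lo hi ∧ pvBrGo ds limit n lo hi ≤ hi ∧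
    (∀ j < pvBrGo ds limit n lo hi, ds.getD j 0 ≤ limit) ∧
    (∀ j, pvBrGo ds limit n lo hi ≤ j → j < ds.length → limit < ds.getD j 0) := by
  intro n
  induction n with
  | zero =>
    intro lo hi hn hlh hhl hlo hhi
    have heq : lo = hi := by omega
    simp only [pvBrGo]
    exact ⟨le_refl _, by omega, hlo, fun j hj hjl => hhi j (by omega) hjl⟩
  | succ n ih =>
    intro lo hi hn hlh hhl hlo hhi
    simp only [pvBrGo]
    by_cases hlt : lo < hi
    · simp only [if_pos hlt]
      have hmid : (lo + hi) / 2 < ds.length := by omega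
      by_cases hcmp : ds.getD ((lo + hi) / 2) 0 ≤ limit
      · simp only [hcmp, if_true]
        have h' := ih ((lo + hi) / 2 + 1) hi (by omega) (by omega) hhl
          (fun j hj => le_trans (pvGetD_mono ds hs (by omega) hmid) hcmp) hhi
        exact ⟨by omega, h'.2.1, h'.2.2.1, h'.2.2.2⟩
      · simp only [hcmp, if_false]
        have h' := ih lo ((lo + hi) / 2) (by omega) (by omega) (by omega) hlo
          (fun j hj hjl => lt_of_lt_of_le (by omega) (pvGetD_mono ds hs hj hjl))
        exact ⟨h'.1, by omega, h'.2.2.1, h'.2.2.2⟩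
    · simp only [if_neg hlt]
      exact ⟨le_refl _, hlh, hlo, fun j hj hjl => hhi j (by omega) hjl⟩

-- binary-search loop invariant
theorem pvBrLoop_spec (ds : List Int) (limit : Int)
    (hs : ds.Pairwise (· ≤ ·)) :
    ∀ lo hi, lo ≤ hi → hi ≤ ds.length →
    (∀ j < lo, ds.getD j 0 ≤ limit) →
    (∀ j, hi ≤ j → j < ds.length → limit < ds.getD j 0) →
    lo ≤ pvBrLoop ds limit lo hi ∧ pvBrLoop ds limit lo hi ≤ hi ∧
    (∀ j < pvBrLoop ds limit lo hi, ds.getD j 0 ≤ limit) ∧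
    (∀ j, pvBrLoop ds limit lo hi ≤ j → j < ds.length → limit < ds.getD j 0) := by
  intro lo hi h1 h2 h3 h4
  unfold pvBrLoop
  exact pvBrLoop_aux ds limit hs (hi - lo) lo hi le_rfl h1 h2 h3 h4

-- per-keyboard step agreement
theorem pvStep_eq (drives : List Int) (budget m k : Int) :
    (drives.foldl (fun money_spent drive =>
      let total_cost := k + drive
      if total_cost ≤ budget ∧ total_cost > money_spent then total_cost else money_spent) m)
    = (let ds := PySem.List.sorted drives (fun x => x)
       let limit := budget - k
       let lo := pvBrLoop ds limit 0 ds.length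
       if lo > 0 then
         let c := k + ds.getD (lo - 1) 0
         if c > m then c else m
       else m) := by
  have hs : (PySem.List.sorted drives (fun x => x)).Pairwise (· ≤ ·) :=
    PySem.List.sorted_pairwise drives (fun x => x)
  rw [pvInnerA_eq_g, pvG_perm k budget ((PySem.List.sorted_perm drives (fun x => x) false).symm)]
  dsimp only
  set ds := PySem.List.sorted drives (fun x => x) with hds
  set r := pvBrLoop ds (budget - k) 0 ds.length with hr
  obtain ⟨h0, hle, hall, hgt⟩ := pvBrLoop_spec ds (budget - k) hs 0 ds.length
    (Nat.zero_le _) le_rfl (fun j hj => absurd hj (Nat.not_lt_zero j))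
    (fun j hj hjl => absurd hjl (Nat.not_lt.mpr hj))
  by_cases hpos : r > 0
  · have hr1 : r - 1 < ds.length := by omega
    have hM : ds.getD (r - 1) 0 ∈ ds := by
      rw [List.getD_eq_getElem _ _ hr1]; exact List.getElem_mem _
    have hMle : ds.getD (r - 1) 0 ≤ budget - k := hall (r - 1) (by omega)
    have hdom : ∀ d ∈ ds, d ≤ budget - k → d ≤ ds.getD (r - 1) 0 := by
      intro d hd hdle
      obtain ⟨j, hj, hdj⟩ := List.mem_iff_getElem.mp hd
      by_cases hjr : j < r
      · have hm := pvGetD_mono ds hs (i := j) (j := r - 1) (by omega) hr1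
        rw [List.getD_eq_getElem _ _ hj] at hm; omega
      · have hg := hgt j (by omega) hj
        rw [List.getD_eq_getElem _ _ hj] at hg; omega
    rw [pvG_max k budget ds _ m hM hMle hdom, if_pos hpos]
    simp only [max_def]; split_ifs <;> omega
  · rw [if_neg hpos]
    apply pvG_none
    intro d hd
    obtain ⟨j, hj, hdj⟩ := List.mem_iff_getElem.mp hd
    have hg := hgt j (by omega) hj
    rw [List.getD_eq_getElem _ _ hj] at hg; omega

-- ===== VERDICT (by name: the statement is the Claim_ definition above) =====
theorem pvFoldl_ext {α β : Type} (f g : β → α → β) (i : β) (l : List α)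
    (h : ∀ b a, f b a = g b a) : l.foldl f i = l.foldl g i := by
  have hfg : f = g := funext fun b => funext fun a => h b a
  rw [hfg]

theorem purchase_electronic_spec : Claim_equal_purchase_electronic := by
  intro keyboards drives budget _
  unfold Spec_purchase_electronic purchase_electronic purchase_electronic_alt
  exact pvFoldl_ext _ _ _ _ (fun m k => pvStep_eq drives budget m k)
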